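-- pv_equiv track=rewrite | github.com/DearCrazyLeaf/astrbot_plugin_hlymcn_signin | main.py | _format_seconds_short
-- ===== SOURCE A (Python) =====
-- from typing import Any, Iterable
--
-- def _format_seconds_short(value: Any) -> str:
--     if isinstance(value, str):
--         text = value.strip()
--         if not text:
--             return "暂无"
--         if ":" in text:
--             parts = [p for p in text.split(":") if p != ""]
--             if len(parts) in (2, 3) and all(p.isdigit() for p in parts):
--                 nums = [int(p) for p in parts]
--                 if len(nums) == 3:
--                     total = nums[0] * 3600 + nums[1] * 60 + nums[2]
--                 else:
--                     total = nums[0] * 60 + nums[1]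
--             else:
--                 total = None
--         else:
--             total = None
--         if total is None:
--             try:
--                 total = int(text)
--             except Exception:
--                 return "暂无"
--     else:
--         try:
--             total = int(value)
--         except Exception:
--             return "暂无"
--     if total <= 0:
--         return "0m"
--     hours = total // 3600
--     minutes = (total % 3600) // 60
--     if hours > 0:
--         return f"{hours}h{minutes:02d}m"
--     return f"{minutes}m"
-- ===== SOURCE B (Python) =====
-- def _scan_parts(text):
--     # one left-to-right character scan: collects the non-empty colon-separated
--     # digit groups; aborts on any other character; accepts only 2 or 3 groups
--     parts, cur = [], ""
--     for ch in text:
--         if ch == ":":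
--             if cur:
--                 parts.append(cur)
--                 cur = ""
--         elif ch.isdigit():
--             cur += ch
--         else:
--             return None
--     if cur:
--         parts.append(cur)
--     return parts if len(parts) in (2, 3) else None
--
--
-- def _format_seconds_short(value):
--     if isinstance(value, str):
--         text = value.strip()
--         if not text:
--             return "暂无"
--         parts = _scan_parts(text)
--         if parts is not None:
--             total = sum(int(p) * w for p, w in zip(reversed(parts), (1, 60, 3600)))
--         else:
--             try:
--                 total = int(text)
--             except ValueError:
--                 return "暂无"
--     else:
--         try:
--             total = int(value)
--         except Exception:
--             return "暂无"
--     m = total // 60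
--     if m <= 0:
--         return "0m"
--     h, mm = divmod(m, 60)
--     return f"{h}h{mm:02d}m" if h > 0 else f"{mm}m"
-- ===== Notes on version B (the rewrite author's own statement) =====
-- stated objective: alternative
-- what changed: The split/filter/all-digits/per-part-int pipeline of the colon branch is replaced by a single character-scan state machine that builds the digit groups in one pass (aborting on any other character), the total comes from a weighted zip over the reversed groups instead of two length-dependent formulas, and the formatting works in whole minutes (m = total // 60, divmod(m, 60)) which removes the separate total <= 0 branch and the % 3600 step.
import Mathlib
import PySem

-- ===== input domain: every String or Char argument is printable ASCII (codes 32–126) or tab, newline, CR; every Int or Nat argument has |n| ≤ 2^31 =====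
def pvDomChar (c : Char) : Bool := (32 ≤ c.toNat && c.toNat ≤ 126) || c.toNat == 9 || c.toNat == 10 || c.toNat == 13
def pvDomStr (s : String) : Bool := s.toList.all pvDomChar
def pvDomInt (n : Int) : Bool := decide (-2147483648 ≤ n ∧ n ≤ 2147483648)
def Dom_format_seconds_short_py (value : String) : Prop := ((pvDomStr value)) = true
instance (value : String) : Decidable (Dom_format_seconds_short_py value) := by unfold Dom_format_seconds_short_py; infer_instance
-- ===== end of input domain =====

-- B replaces the split/filter/validate/per-part-int colon pipeline by a single character-scan
-- state machine, sums the groups with reversed weights, and formats from whole minutes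
-- (removing the separate total <= 0 branch): an alternative decomposition, same values.

-- ===== PORT A =====
def format_seconds_short_py (value : String) : String :=
  let text := PySem.Str.strip value
  if text = "" then "暂无"
  else
    let total? : Option Int :=
      if PySem.Str.isIn ":" text then
        let parts := ((PySem.Str.split? text ":").getD []).filter (fun p => p ≠ "")
        if (parts.length = 2 ∨ parts.length = 3) ∧ parts.all PySem.Str.strIsdigit then
          let nums := parts.map (fun p => (PySem.Int.ofStr? p).getD 0)
          if nums.length = 3 then
            some (nums[0]! * 3600 + nums[1]! * 60 + nums[2]!)
          else
            some (nums[0]! * 60 + nums[1]!)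
        else none
      else none
    match (match total? with | some t => some t | none => PySem.Int.ofStr? text) with
    | none => "暂无"
    | some total =>
      if total ≤ 0 then "0m"
      else
        let hours := PySem.Int.floordiv total 3600
        let minutes := PySem.Int.floordiv (PySem.Int.mod total 3600) 60
        if hours > 0 then
          PySem.Int.toStr hours ++ "h" ++ PySem.Str.zfill (PySem.Int.toStr minutes) 2 ++ "m"
        else PySem.Int.toStr minutes ++ "m"

-- ===== PORT B =====
-- _scan_parts's loop over the string, character by character; the Python strings
-- `cur`/the collected parts are represented by their character lists (exact).
def pvScanAux : List Char → List (List Char) → List Char → Option (List (List Char))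
  | [], parts, cur => some (if cur = [] then parts else parts ++ [cur])
  | c :: rest, parts, cur =>
    if c = ':' then pvScanAux rest (if cur = [] then parts else parts ++ [cur]) []
    else if PySem.Chars.isdigit c then pvScanAux rest parts (cur ++ [c])
    else none

-- port of _scan_parts (the trailing `if cur` flush is the [] case of pvScanAux)
def pvScanParts (text : String) : Option (List (List Char)) :=
  match pvScanAux text.toList [] [] with
  | none => none
  | some parts => if parts.length = 2 ∨ parts.length = 3 then some parts else none

def format_seconds_short_py_alt (value : String) : String :=
  if PySem.Str.strip value = "" then "暂无"
  else
    let text := PySem.Str.strip value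
    let total? : Option Int :=
      match pvScanParts text with
      | some parts =>
        -- sum(int(p) * w for p, w in zip(reversed(parts), (1, 60, 3600)))
        some ((parts.reverse.zip [(1 : Int), 60, 3600]).foldl
          (fun acc pw => acc + (PySem.Int.ofStr? (String.ofList pw.1)).getD 0 * pw.2) 0)
      | none => PySem.Int.ofStr? text
    match total? with
    | none => "暂无"
    | some total =>
      let m := PySem.Int.floordiv total 60
      if m ≤ 0 then "0m"
      else
        let h := PySem.Int.floordiv m 60
        let mm := PySem.Int.mod m 60
        if h > 0 then
          PySem.Int.toStr h ++ "h" ++ PySem.Str.zfill (PySem.Int.toStr mm) 2 ++ "m"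
        else PySem.Int.toStr mm ++ "m"

-- ===== PRECONDITION & SPEC =====
def Spec_format_seconds_short_py (value : String) (out : String) : Prop := out = format_seconds_short_py_alt value
instance (value : String) (out : String) : Decidable (Spec_format_seconds_short_py value out) := by unfold Spec_format_seconds_short_py; infer_instance

-- ===== CLAIM (what is proved, stated in full; the proofs are below) =====
def Claim_equal_format_seconds_short_py : Prop := ∀ (value : String), Dom_format_seconds_short_py value → Spec_format_seconds_short_py value (format_seconds_short_py value)

-- ===== LEMMAS AND PROOFS =====

-- a character the scanner accepts: a colon or a digit
def pvGood (c : Char) : Bool := c == ':' || PySem.Chars.isdigit c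

-- structural single-pass splitter on ':' (reference model for both sides)
def pvSegs : List Char → List (List Char)
  | [] => [[]]
  | c :: cs =>
    if c = ':' then [] :: pvSegs cs
    else
      match pvSegs cs with
      | [] => [[c]]
      | s :: ss => (c :: s) :: ss

def pvGlue (pre : List Char) : List (List Char) → List (List Char)
  | [] => [pre]
  | s :: ss => (pre ++ s) :: ss

theorem pvSegs_ne_nil (cs : List Char) : pvSegs cs ≠ [] := by
  cases cs with
  | nil => simp [pvSegs]
  | cons c cs =>
    by_cases h : c = ':'
    · simp [pvSegs, h]
    · simp only [pvSegs, if_neg h]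
      cases hs : pvSegs cs <;> simp

theorem pvGlue_glue (a b : List Char) (ss : List (List Char)) :
    pvGlue a (pvGlue b ss) = pvGlue (a ++ b) ss := by
  cases ss <;> simp [pvGlue]

-- the scanner, characterised by pvSegs
theorem pvSegs_cons_ne (c : Char) (cs : List Char) (hc : c ≠ ':') :
    pvSegs (c :: cs) = pvGlue [c] (pvSegs cs) := by
  simp only [pvSegs, if_neg hc]
  cases h : pvSegs cs <;> simp [pvGlue]

theorem pvScanAux_eq (cs : List Char) (parts : List (List Char)) (cur : List Char) :
    pvScanAux cs parts cur =
      if cs.all pvGood then some (parts ++ (pvGlue cur (pvSegs cs)).filter (· ≠ [])) else none := by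
  induction cs generalizing parts cur with
  | nil =>
    by_cases hcur : cur = [] <;> simp [pvScanAux, hcur, pvGlue, pvSegs]
  | cons c rest ih =>
    by_cases hc : c = ':'
    · subst hc
      have hg : pvGood ':' = true := by decide
      simp only [pvScanAux]
      rw [ih]
      rcases hsegs : pvSegs rest with _ | ⟨s, ss⟩
      · exact absurd hsegs (pvSegs_ne_nil rest)
      · simp only [pvSegs, hsegs, List.all_cons, hg, Bool.true_and, pvGlue]
        by_cases hr : rest.all pvGood <;> by_cases hcur : cur = [] <;>
          simp [hr, hcur, List.filter]
    · by_cases hd : PySem.Chars.isdigit c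
      · have hg : pvGood c = true := by simp [pvGood, hd]
        simp only [pvScanAux, if_neg hc, if_pos hd]
        rw [ih, pvSegs_cons_ne c rest hc, pvGlue_glue]
        simp [List.all_cons, hg]
      · have hg : pvGood c = false := by simp [pvGood, hc, hd]
        simp [pvScanAux, if_neg hc, hd, List.all_cons, hg]

-- PySem's splitOn on a single colon is pvSegs
theorem pvGo_spec (fuel : Nat) (l cur : List Char) (acc : List (List Char)) (h : l.length < fuel) :
    PySem.Chars.splitOn.go [':'] fuel l cur acc = acc.reverse ++ pvGlue cur.reverse (pvSegs l) := by
  induction fuel generalizing l cur acc with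
  | zero => omega
  | succ fuel ih =>
    cases l with
    | nil =>
      simp [PySem.Chars.splitOn.go, pvSegs, pvGlue]
    | cons c rest =>
      have hstep : PySem.Chars.splitOn.go [':'] (fuel+1) (c :: rest) cur acc =
          if c = ':' then PySem.Chars.splitOn.go [':'] fuel rest [] (cur.reverse :: acc)
          else PySem.Chars.splitOn.go [':'] fuel rest (c :: cur) acc := by
        simp only [PySem.Chars.splitOn.go, List.isPrefixOf]
        by_cases hcc : c = ':'
        · simp [hcc]
        · simp [hcc]
          intro hh
          exact absurd hh.symm hcc
      rw [hstep]
      have hlen : rest.length < fuel := by simp at h; omega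
      by_cases hc : c = ':'
      · subst hc
        rw [if_pos rfl, ih rest [] _ hlen]
        rcases hsegs : pvSegs rest with _ | ⟨s, ss⟩
        · exact absurd hsegs (pvSegs_ne_nil rest)
        · simp [pvSegs, hsegs, pvGlue]
      · rw [if_neg hc, ih rest (c :: cur) acc hlen, pvSegs_cons_ne c rest hc, pvGlue_glue]
        simp

theorem pvSplitOn_eq_segs (cs : List Char) : PySem.Chars.splitOn cs [':'] = pvSegs cs := by
  unfold PySem.Chars.splitOn
  rw [pvGo_spec (cs.length + 1) cs [] [] (by omega)]
  rcases hsegs : pvSegs cs with _ | ⟨s, ss⟩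
  · exact absurd hsegs (pvSegs_ne_nil cs)
  · simp [pvGlue]

theorem pvMem_segs (cs : List Char) (b : Char) (hb : b ∈ cs) (hne : b ≠ ':') :
    ∃ s ∈ pvSegs cs, b ∈ s := by
  induction cs with
  | nil => cases hb
  | cons c cs ih =>
    by_cases hc : c = ':'
    · subst hc
      rcases List.mem_cons.mp hb with rfl | hb'
      · exact absurd rfl hne
      · rcases ih hb' with ⟨s, hs, hbs⟩
        exact ⟨s, by simp [pvSegs, hs], hbs⟩
    · simp only [pvSegs, if_neg hc]
      rcases List.mem_cons.mp hb with rfl | hb'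
      · rcases h : pvSegs cs with _ | ⟨s, ss⟩
        · exact ⟨[b], by simp, by simp⟩
        · exact ⟨b :: s, by simp, by simp⟩
      · rcases ih hb' with ⟨s, hs, hbs⟩
        rcases h : pvSegs cs with _ | ⟨s0, ss⟩
        · rw [h] at hs; cases hs
        · rw [h] at hs
          rcases List.mem_cons.mp hs with rfl | hs'
          · exact ⟨c :: s, by simp, by simp [hbs]⟩
          · exact ⟨s, by simp [hs'], hbs⟩

theorem pvSegs_all_digit (cs : List Char) (hg : cs.all pvGood = true)
    (s : List Char) (hs : s ∈ pvSegs cs) : s.all PySem.Chars.isdigit = true := by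
  induction cs generalizing s with
  | nil => simp [pvSegs] at hs; simp [hs]
  | cons c cs ih =>
    simp only [List.all_cons, Bool.and_eq_true] at hg
    by_cases hc : c = ':'
    · simp only [pvSegs, if_pos hc] at hs
      rcases List.mem_cons.mp hs with rfl | hs'
      · simp
      · exact ih hg.2 s hs'
    · have hd : PySem.Chars.isdigit c = true := by
        have := hg.1; simp [pvGood, hc] at this; exact this
      simp only [pvSegs, if_neg hc] at hs
      rcases h : pvSegs cs with _ | ⟨s0, ss⟩
      · rw [h] at hs
        simp only [List.mem_singleton] at hs
        subst hs; simp [hd]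
      · rw [h] at hs
        rcases List.mem_cons.mp hs with rfl | hs'
        · have h0 := ih hg.2 s0 (by simp [h])
          simp only [List.all_cons, Bool.and_eq_true]
          exact ⟨hd, h0⟩
        · exact ih hg.2 s (by simp [h, hs'])

theorem pvSegs_no_colon (cs : List Char) (h : ':' ∉ cs) : pvSegs cs = [cs] := by
  induction cs with
  | nil => simp [pvSegs]
  | cons c cs ih =>
    have hc : c ≠ ':' := fun hc => h (hc ▸ List.mem_cons_self)
    have := ih (fun hm => h (List.mem_cons_of_mem _ hm))
    simp [pvSegs, hc, this]

-- the two formatting tails agree for every total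
theorem pv_tail_eq (total : Int) :
    (if total ≤ 0 then "0m"
     else
       let hours := PySem.Int.floordiv total 3600
       let minutes := PySem.Int.floordiv (PySem.Int.mod total 3600) 60
       if hours > 0 then
         PySem.Int.toStr hours ++ "h" ++ PySem.Str.zfill (PySem.Int.toStr minutes) 2 ++ "m"
       else PySem.Int.toStr minutes ++ "m")
    =
    (let m := PySem.Int.floordiv total 60
     if m ≤ 0 then "0m"
     else
       let h := PySem.Int.floordiv m 60
       let mm := PySem.Int.mod m 60
       if h > 0 then
         PySem.Int.toStr h ++ "h" ++ PySem.Str.zfill (PySem.Int.toStr mm) 2 ++ "m"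
       else PySem.Int.toStr mm ++ "m") := by
  have h60 : PySem.Int.floordiv total 60 = total / 60 :=
    PySem.Int.floordiv_eq_ediv_of_pos (by norm_num)
  have h3600 : PySem.Int.floordiv total 3600 = total / 3600 :=
    PySem.Int.floordiv_eq_ediv_of_pos (by norm_num)
  have hmin : PySem.Int.floordiv (PySem.Int.mod total 3600) 60 = total % 3600 / 60 := by
    rw [PySem.Int.mod_eq_emod_of_pos (by norm_num)]
    exact PySem.Int.floordiv_eq_ediv_of_pos (by norm_num)
  have hh2 : PySem.Int.floordiv (PySem.Int.floordiv total 60) 60 = total / 60 / 60 := by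
    rw [h60]; exact PySem.Int.floordiv_eq_ediv_of_pos (by norm_num)
  have hmm : PySem.Int.mod (PySem.Int.floordiv total 60) 60 = total / 60 % 60 := by
    rw [h60]; exact PySem.Int.mod_eq_emod_of_pos (by norm_num)
  simp only [h60, h3600, hmin]
  have e1 : total / 3600 = total / 60 / 60 := by omega
  have e2 : total % 3600 / 60 = total / 60 % 60 := by omega
  rw [e1, e2]
  by_cases hle : total ≤ 0
  · have hm : total / 60 ≤ 0 := by omega
    simp [hle, hm]
  · by_cases hm0 : total / 60 ≤ 0
    · have hm : total / 60 = 0 := by omega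
      have hng : ¬ total / 60 / 60 > 0 := by omega
      simp only [if_neg hle, hm]
      decide
    · simp [hle, hm0]

-- filter commutes with the String↔List Char bridge
theorem pv_filter_map (L : List String) :
    (L.map String.toList).filter (· ≠ []) = (L.filter (· ≠ "")).map String.toList := by
  induction L with
  | nil => rfl
  | cons p L ih =>
    by_cases hp : p = ""
    · subst hp; simpa using ih
    · have h2 : p.toList ≠ [] := fun h => hp (String.toList_eq_nil_iff.mp h)
      simp [hp, h2]
      simpa using ih

-- the two total computations agree on every non-empty text
theorem pv_total_eq (text : String) (hne : text ≠ "") :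
    (match (if PySem.Str.isIn ":" text then
          let parts := ((PySem.Str.split? text ":").getD []).filter (fun p => p ≠ "")
          if (parts.length = 2 ∨ parts.length = 3) ∧ parts.all PySem.Str.strIsdigit then
            let nums := parts.map (fun p => (PySem.Int.ofStr? p).getD 0)
            if nums.length = 3 then some (nums[0]! * 3600 + nums[1]! * 60 + nums[2]!)
            else some (nums[0]! * 60 + nums[1]!)
          else none
        else none) with
     | some t => some t
     | none => PySem.Int.ofStr? text)
    =
    (match pvScanParts text with
     | some parts =>
       some ((parts.reverse.zip [(1 : Int), 60, 3600]).foldl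
         (fun acc pw => acc + (PySem.Int.ofStr? (String.ofList pw.1)).getD 0 * pw.2) 0)
     | none => PySem.Int.ofStr? text) := by
  have hcs : text.toList ≠ [] := fun h => hne (String.toList_eq_nil_iff.mp h)
  obtain ⟨L, hL, hLmap⟩ : ∃ L, PySem.Str.split? text ":" = some L ∧
      L.map String.toList = pvSegs text.toList := by
    have h := PySem.Str.split?_map text ":"
    cases hS : PySem.Str.split? text ":" with
    | none => rw [hS] at h; simp [PySem.Chars.split?] at h
    | some L =>
      rw [hS] at h
      refine ⟨L, rfl, ?_⟩
      have hsep : (":" : String).toList = [':'] := rfl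
      rw [hsep] at h
      simp only [Option.map_some, PySem.Chars.split?, List.isEmpty_cons, if_false,
        Option.some.injEq, Bool.false_eq_true] at h
      rw [h, pvSplitOn_eq_segs]
  have hmapfilter : (L.filter (fun p => p ≠ "")).map String.toList =
      (pvSegs text.toList).filter (· ≠ []) := by
    rw [← pv_filter_map, hLmap]
  by_cases hg : text.toList.all pvGood
  · -- every character is a colon or a digit: the scanner succeeds
    have hscan : pvScanAux text.toList [] [] =
        some ((pvSegs text.toList).filter (· ≠ [])) := by
      rw [pvScanAux_eq]
      rcases hsegs : pvSegs text.toList with _ | ⟨s, ss⟩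
      · exact absurd hsegs (pvSegs_ne_nil _)
      · simp [hg, pvGlue]
    by_cases hcol : ':' ∈ text.toList
    · have hIn : PySem.Str.isIn ":" text = true := by
        rw [PySem.Str.isIn_iff_infix]
        exact (List.singleton_infix_iff _ _).mpr hcol
      have hdig : (L.filter (fun p => p ≠ "")).all PySem.Str.strIsdigit = true := by
        rw [List.all_eq_true]
        intro p hp
        rw [PySem.Str.strIsdigit_eq]
        have hmem : p.toList ∈ (pvSegs text.toList).filter (· ≠ []) := by
          rw [← hmapfilter]; exact List.mem_map_of_mem hp
        have hmem2 := List.mem_filter.mp hmem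
        have hall := pvSegs_all_digit _ hg _ hmem2.1
        have hne2 : p.toList ≠ [] := by simpa using hmem2.2
        simp [PySem.Chars.strIsdigit, hall, hne2]
      have hlenLF : (L.filter (fun p => p ≠ "")).length =
          ((pvSegs text.toList).filter (· ≠ [])).length := by
        rw [← hmapfilter, List.length_map]
      by_cases h23 : ((pvSegs text.toList).filter (· ≠ [])).length = 2 ∨
          ((pvSegs text.toList).filter (· ≠ [])).length = 3
      · have hcond : ((L.filter (fun p => p ≠ "")).length = 2 ∨
            (L.filter (fun p => p ≠ "")).length = 3) ∧
            (L.filter (fun p => p ≠ "")).all PySem.Str.strIsdigit := by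
          refine ⟨?_, hdig⟩
          rw [hlenLF]; exact h23
        simp only [hIn, if_true, hL, Option.getD_some, if_pos hcond,
          pvScanParts, hscan, if_pos h23]
        rcases h23 with h2 | h3
        · have hPlen : (L.filter (fun p => p ≠ "")).length = 2 := by rw [hlenLF]; exact h2
          obtain ⟨s0, s1, hF⟩ := List.length_eq_two.mp h2
          obtain ⟨q0, q1, hQ⟩ := List.length_eq_two.mp hPlen
          have hq : q0.toList = s0 ∧ q1.toList = s1 := by
            have h' := hmapfilter
            rw [hQ, hF] at h'
            simpa using h'
          simp only [hQ, hF, List.map_cons, List.map_nil, List.length_cons,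
            List.length_nil, List.reverse_cons, List.reverse_nil, List.nil_append,
            List.cons_append, List.zip, List.zipWith, List.foldl]
          simp only [← hq.1, ← hq.2, String.ofList_toList]
          norm_num
          ring
        · have hPlen : (L.filter (fun p => p ≠ "")).length = 3 := by rw [hlenLF]; exact h3
          obtain ⟨s0, s1, s2, hF⟩ := List.length_eq_three.mp h3
          obtain ⟨q0, q1, q2, hQ⟩ := List.length_eq_three.mp hPlen
          have hq : q0.toList = s0 ∧ q1.toList = s1 ∧ q2.toList = s2 := by
            have h' := hmapfilter
            rw [hQ, hF] at h'
            simpa using h'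
          simp only [hQ, hF, List.map_cons, List.map_nil, List.length_cons,
            List.length_nil, List.reverse_cons, List.reverse_nil, List.nil_append,
            List.cons_append, List.zip, List.zipWith, List.foldl]
          simp only [← hq.1, ← hq.2.1, ← hq.2.2, String.ofList_toList]
          norm_num
          ring
      · have hcond : ¬(((L.filter (fun p => p ≠ "")).length = 2 ∨
            (L.filter (fun p => p ≠ "")).length = 3) ∧
            (L.filter (fun p => p ≠ "")).all PySem.Str.strIsdigit) := by
          intro hc
          exact h23 (by rw [← hlenLF]; exact hc.1)
        simp only [hIn, if_true, hL, Option.getD_some, if_neg hcond,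
          pvScanParts, hscan, if_neg h23]
    · have hIn : PySem.Str.isIn ":" text = false := by
        refine Bool.eq_false_iff.mpr (fun h => hcol ?_)
        have h2 := (PySem.Str.isIn_iff_infix _ _).mp h
        exact (List.singleton_infix_iff _ _).mp h2
      have hF1 : (pvSegs text.toList).filter (· ≠ []) = [text.toList] := by
        rw [pvSegs_no_colon _ hcol]
        simp [hcs]
      have hflen : ¬(((pvSegs text.toList).filter (· ≠ [])).length = 2 ∨
          ((pvSegs text.toList).filter (· ≠ [])).length = 3) := by
        rw [hF1]; simp
      simp only [hIn, Bool.false_eq_true, if_false, pvScanParts, hscan, if_neg hflen]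
  · -- some character is neither colon nor digit: the scanner aborts
    have hgf : text.toList.all pvGood = false := by
      revert hg; cases text.toList.all pvGood <;> simp
    have hscan : pvScanAux text.toList [] [] = none := by
      rw [pvScanAux_eq, if_neg (by simp [hgf])]
    by_cases hcol : ':' ∈ text.toList
    · have hIn : PySem.Str.isIn ":" text = true := by
        rw [PySem.Str.isIn_iff_infix]
        exact (List.singleton_infix_iff _ _).mpr hcol
      obtain ⟨b, hbmem, hbad⟩ : ∃ b ∈ text.toList, ¬ pvGood b = true := by
        simpa [List.all_eq_true] using hgf
      have hb1 : b ≠ ':' := by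
        intro h; exact hbad (by rw [h]; decide)
      have hb2 : PySem.Chars.isdigit b = false := by
        revert hbad; simp [pvGood]
      obtain ⟨s, hsmem, hbs⟩ := pvMem_segs _ b hbmem hb1
      have hsne : s ≠ [] := List.ne_nil_of_mem hbs
      have hsF : s ∈ (pvSegs text.toList).filter (· ≠ []) :=
        List.mem_filter.mpr ⟨hsmem, by simp [hsne]⟩
      obtain ⟨p, hpmem, hpl⟩ : ∃ p ∈ L.filter (fun p => p ≠ ""), p.toList = s := by
        have hm : s ∈ (L.filter (fun p => p ≠ "")).map String.toList := by
          rw [hmapfilter]; exact hsF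
        simpa using hm
      have hpd : PySem.Str.strIsdigit p = false := by
        rw [PySem.Str.strIsdigit_eq, hpl]
        have hallf : s.all PySem.Chars.isdigit = false := by
          refine Bool.eq_false_iff.mpr (fun h => ?_)
          rw [List.all_eq_true] at h
          have := h b hbs
          rw [hb2] at this
          cases this
        simp [PySem.Chars.strIsdigit, hallf]
      have hcond : ¬(((L.filter (fun p => p ≠ "")).length = 2 ∨
          (L.filter (fun p => p ≠ "")).length = 3) ∧
          (L.filter (fun p => p ≠ "")).all PySem.Str.strIsdigit) := by
        rintro ⟨-, hall⟩
        rw [List.all_eq_true] at hall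
        have := hall p hpmem
        rw [hpd] at this
        cases this
      simp only [hIn, if_true, hL, Option.getD_some, if_neg hcond,
        pvScanParts, hscan]
    · have hIn : PySem.Str.isIn ":" text = false := by
        refine Bool.eq_false_iff.mpr (fun h => hcol ?_)
        have h2 := (PySem.Str.isIn_iff_infix _ _).mp h
        exact (List.singleton_infix_iff _ _).mp h2
      simp only [hIn, Bool.false_eq_true, if_false, pvScanParts, hscan]

-- ===== VERDICT (by name: the statement is the Claim_ definition above) =====
theorem format_seconds_short_py_spec : Claim_equal_format_seconds_short_py := by
  intro value _
  unfold Spec_format_seconds_short_py format_seconds_short_py format_seconds_short_py_alt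
  by_cases ht : PySem.Str.strip value = ""
  · simp [ht]
  · simp only [if_neg ht]
    rw [pv_total_eq (PySem.Str.strip value) ht]
    cases hx : (match pvScanParts (PySem.Str.strip value) with
      | some parts =>
        some ((parts.reverse.zip [(1 : Int), 60, 3600]).foldl
          (fun (acc : Int) (pw : List Char × Int) =>
            acc + (PySem.Int.ofStr? (String.ofList pw.1)).getD 0 * pw.2) 0)
      | none => PySem.Int.ofStr? (PySem.Str.strip value)) with
    | none => rfl
    | some t => exact pv_tail_eq t
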